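-- pv_equiv track=rewrite | github.com/dasch-swiss/dsp-permissions-scripts | dsp_permissions_scripts/models/scope.py | _remove_duplicates_from_kwargs
-- ===== SOURCE A (Python) =====
-- import copy
--
-- def _remove_duplicates_from_kwargs(kwargs: dict[str, list[str]]) -> dict[str, list[str]]:
--     res = copy.deepcopy(kwargs)
--     permissions = ["RV", "V", "M", "D", "CR"]
--     permissions = [perm for perm in permissions if perm in kwargs]
--     for perm in permissions:
--         higher_permissions = permissions[permissions.index(perm) + 1 :] if perm != "CR" else []
--         for group in kwargs[perm]:
--             nested_list = [kwargs[hp] for hp in higher_permissions]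
--             flat_list = [y for x in nested_list for y in x]
--             if flat_list.count(group) > 0:
--                 res[perm].remove(group)
--     return res
-- ===== SOURCE B (Python) =====
-- def _remove_duplicates_from_kwargs(kwargs: dict[str, list[str]]) -> dict[str, list[str]]:
--     res = {perm: list(groups) for perm, groups in kwargs.items()}
--     seen = set()
--     for perm in ("CR", "D", "M", "V", "RV"):
--         if perm in kwargs:
--             res[perm] = [g for g in kwargs[perm] if g not in seen]
--             seen.update(kwargs[perm])
--     return res
-- ===== Notes on version B (the rewrite author's own statement) =====
-- stated objective: faster
-- what changed: Instead of re-flattening all higher permission levels for every single group and calling list.remove, B makes one high-to-low pass that keeps a running 'seen' set and rebuilds each level with a single filter.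
import Mathlib
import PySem

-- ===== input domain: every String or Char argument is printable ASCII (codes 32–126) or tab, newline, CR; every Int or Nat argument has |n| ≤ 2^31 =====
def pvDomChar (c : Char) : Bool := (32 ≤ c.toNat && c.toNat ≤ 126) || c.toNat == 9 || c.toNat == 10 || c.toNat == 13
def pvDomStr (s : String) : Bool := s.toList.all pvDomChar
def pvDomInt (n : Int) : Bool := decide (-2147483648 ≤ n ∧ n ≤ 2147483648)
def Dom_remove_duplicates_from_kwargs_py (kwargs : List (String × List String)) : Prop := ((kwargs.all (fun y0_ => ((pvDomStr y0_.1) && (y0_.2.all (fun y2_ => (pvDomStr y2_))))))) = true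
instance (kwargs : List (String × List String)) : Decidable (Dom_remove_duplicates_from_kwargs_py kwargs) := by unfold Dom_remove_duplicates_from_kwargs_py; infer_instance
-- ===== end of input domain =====

-- B replaces A's per-group re-flattening of all higher levels (and list.remove) by a single
-- high-to-low pass with a running 'seen' set; return values agree on every dict input.

-- ===== PORT A =====
def remove_duplicates_from_kwargs_py (kwargs : List (String × List String)) : List (String × List String) :=
  let res : PySem.Dict String (List String) := PySem.Dict.mk kwargs   -- copy.deepcopy(kwargs)
  let permissions0 : List String := ["RV", "V", "M", "D", "CR"]
  let permissions := permissions0.filter (fun perm => (PySem.Dict.mk kwargs).contains perm)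
  (permissions.foldl (fun (res : PySem.Dict String (List String)) perm =>
    let higher_permissions : List String :=
      if perm ≠ "CR" then
        -- permissions[permissions.index(perm) + 1:]  (index? never misses: perm ∈ permissions)
        PySem.List.slice permissions (some ((((PySem.List.index? permissions perm).getD 0 : Nat) : Int) + 1)) none
      else []
    ((PySem.Dict.mk kwargs).getD perm []).foldl (fun (res : PySem.Dict String (List String)) group =>
      let nested_list := higher_permissions.map (fun hp => (PySem.Dict.mk kwargs).getD hp [])
      let flat_list := nested_list.flatten
      if PySem.List.count flat_list group > 0 then
        -- res[perm].remove(group); remove? never fails here (each occurrence is erased at most once)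
        PySem.Dict.modify res perm [] (fun l => (PySem.List.remove? l group).getD l)
      else res) res) res).items

-- ===== PORT B =====
def remove_duplicates_from_kwargs_py_alt (kwargs : List (String × List String)) : List (String × List String) :=
  let res : PySem.Dict String (List String) := PySem.Dict.mk kwargs   -- {perm: list(groups) for ...}
  (((["CR", "D", "M", "V", "RV"] : List String).foldl
    (fun (st : PySem.Dict String (List String) × PySem.Set String) perm =>
      if (PySem.Dict.mk kwargs).contains perm then
        let v := (PySem.Dict.mk kwargs).getD perm []
        (st.1.insert perm (v.filter (fun g => !(PySem.Set.contains st.2 g))),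
         PySem.Set.update st.2 v)
      else st)
    (res, PySem.Set.empty)).1).items

-- ===== PRECONDITION & SPEC =====
-- Pre_ requires distinct keys: a Python dict cannot contain a duplicate key, so association
-- lists with a repeated first component encode no input of A at all.
def Pre_remove_duplicates_from_kwargs_py (kwargs : List (String × List String)) : Prop :=
  (kwargs.map Prod.fst).Nodup
instance (kwargs : List (String × List String)) : Decidable (Pre_remove_duplicates_from_kwargs_py kwargs) := by unfold Pre_remove_duplicates_from_kwargs_py; infer_instance

def pvWitness_remove_duplicates_from_kwargs_py : (List (String × List String)) :=
  [("V", ["a", "b"]), ("CR", ["a"]), ("other", ["c"])]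

def Spec_remove_duplicates_from_kwargs_py (kwargs : List (String × List String)) (out : List (String × List String)) : Prop := out = remove_duplicates_from_kwargs_py_alt kwargs
instance (kwargs : List (String × List String)) (out : List (String × List String)) : Decidable (Spec_remove_duplicates_from_kwargs_py kwargs out) := by unfold Spec_remove_duplicates_from_kwargs_py; infer_instance

-- ===== CLAIM (what is proved, stated in full; the proofs are below) =====
def Claim_equal_remove_duplicates_from_kwargs_py : Prop := ∀ (kwargs : List (String × List String)), Dom_remove_duplicates_from_kwargs_py kwargs → Pre_remove_duplicates_from_kwargs_py kwargs → Spec_remove_duplicates_from_kwargs_py kwargs (remove_duplicates_from_kwargs_py kwargs)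

-- ===== LEMMAS AND PROOFS =====

theorem cr_last (l : List String) (h : List.Sublist ("CR"::l) ["RV","V","M","D","CR"]) : l = [] := by
  simp only [List.cons_sublist_iff] at h
  obtain ⟨r₁, r₂, he, hm, hs⟩ := h
  rcases r₁ with _|⟨a,r₁⟩; · simp at hm
  injection he with ha he; subst ha
  rcases r₁ with _|⟨a,r₁⟩; · simp at hm
  injection he with ha he; subst ha
  rcases r₁ with _|⟨a,r₁⟩; · simp at hm
  injection he with ha he; subst ha
  rcases r₁ with _|⟨a,r₁⟩; · simp at hm
  injection he with ha he; subst ha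
  rcases r₁ with _|⟨a,r₁⟩; · simp at hm
  injection he with ha he; subst ha
  have h2 : r₂ = [] := by
    have hl := congrArg List.length he; simp at hl; exact List.eq_nil_of_length_eq_zero (by omega)
  subst h2; simpa using hs

-- A's inner erase loop as a function of the value list
theorem eraseD_cons (x g : String) (hne : (g == x) = false) (c : List String) :
    (PySem.List.remove? (g::c) x).getD (g::c) = g :: ((PySem.List.remove? c x).getD c) := by
  simp [PySem.List.remove?, List.idxOf?_cons, hne]
  cases h : List.idxOf? x c <;> simp [List.eraseIdx]

theorem val_loop_helper (F : List String) (g : String) (hg : g ∉ F) :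
    ∀ (l c : List String),
      l.foldl (fun cur x => if PySem.List.count F x > 0 then (PySem.List.remove? cur x).getD cur else cur) (g :: c)
        = g :: l.foldl (fun cur x => if PySem.List.count F x > 0 then (PySem.List.remove? cur x).getD cur else cur) c := by
  intro l
  induction l with
  | nil => intro c; rfl
  | cons x t ih =>
    intro c
    simp only [List.foldl_cons]
    by_cases h : PySem.List.count F x > 0
    · have hxF : x ∈ F := by
        simpa [PySem.List.count, List.count_pos_iff] using h
      have hne : (g == x) = false := beq_eq_false_iff_ne.mpr (fun e => hg (e ▸ hxF))
      rw [if_pos h, if_pos h, eraseD_cons x g hne c, ih]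
    · rw [if_neg h, if_neg h, ih]

theorem val_loop (F : List String) :
    ∀ (l : List String),
      l.foldl (fun cur x => if PySem.List.count F x > 0 then (PySem.List.remove? cur x).getD cur else cur) l
        = l.filter (fun g => !(F.contains g)) := by
  intro l
  induction l with
  | nil => rfl
  | cons g t ih =>
    simp only [List.foldl_cons]
    by_cases h : PySem.List.count F g > 0
    · have hmem : g ∈ F := by
        simpa [PySem.List.count, List.count_pos_iff] using h
      have hgF : F.contains g = true := List.contains_iff_mem.mpr hmem
      have hrm : (PySem.List.remove? (g::t) g).getD (g::t) = t := by
        simp [PySem.List.remove?, List.idxOf?_cons, List.eraseIdx]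
      rw [if_pos h, hrm, ih, List.filter_cons, hgF]
      simp
    · have hmem : g ∉ F := by
        simpa [PySem.List.count, List.count_pos_iff] using h
      have hgF : F.contains g = false := by
        simpa [List.contains_iff_mem] using hmem
      rw [if_neg h, val_loop_helper F g hmem t t, ih, List.filter_cons, hgF]
      simp

-- list-level: replacing the pair at an absent key changes nothing
theorem map_replace_not_mem (k : String) (v : List String) :
    ∀ (l : List (String × List String)), k ∉ l.map Prod.fst →
      l.map (fun p => if p.1 == k then (k, v) else p) = l := by
  intro l
  induction l with
  | nil => intro _; rfl
  | cons p t ih =>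
    intro hk
    rw [List.map_cons, List.mem_cons, not_or] at hk
    rw [List.map_cons]
    have h1 : (p.1 == k) = false := beq_eq_false_iff_ne.mpr (fun e => hk.1 e.symm)
    simp only [h1, Bool.false_eq_true, if_false]
    rw [ih hk.2]

theorem map_replace_eq_self :
    ∀ (l : List (String × List String)) (k : String) (v : List String),
      (l.map Prod.fst).Nodup → List.find? (fun p => p.1 == k) l = some (k, v) →
      l.map (fun p => if p.1 == k then (k, v) else p) = l := by
  intro l
  induction l with
  | nil => intro k v _ hf; simp at hf
  | cons p t ih =>
    intro k v hnd hf
    cases hpk : (p.1 == k) with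
    | true =>
      rw [List.find?_cons_of_pos (p := fun q => q.1 == k) (a := p) (l := t) hpk] at hf
      have hp : p = (k, v) := by injection hf
      have hk : p.1 = k := eq_of_beq hpk
      rw [List.map_cons]
      simp only [hpk, if_true]
      rw [hp, map_replace_not_mem k v t (by
        rw [← hk]
        exact (List.nodup_cons.mp (by simpa using hnd)).1)]
    | false =>
      rw [List.find?_cons_of_neg (p := fun q => q.1 == k) (a := p) (l := t) (by simp [hpk])] at hf
      rw [List.map_cons]
      simp only [hpk, Bool.false_eq_true, if_false]
      rw [ih k v (List.nodup_cons.mp (by simpa using hnd)).2 hf]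

theorem insert_getD_self (d : PySem.Dict String (List String)) (k : String) (dflt : List String)
    (hnd : d.keys.Nodup) (hc : d.contains k = true) : d.insert k (d.getD k dflt) = d := by
  obtain ⟨v, hv⟩ : ∃ v, d.get? k = some v := by
    rw [PySem.Dict.contains_eq_isSome_get?] at hc
    exact Option.isSome_iff_exists.mp hc
  rw [PySem.Dict.getD_eq_get?_getD, hv, Option.getD_some]
  obtain ⟨p0, hf, hp2⟩ : ∃ p0, List.find? (fun p => p.1 == k) d.items = some p0 ∧ p0.2 = v := by
    simpa [PySem.Dict.get?] using hv
  have hp1 : p0.1 = k := eq_of_beq (List.find?_some (p := fun q : String × List String => q.1 == k) hf)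
  have hp0 : p0 = (k, v) := Prod.ext hp1 hp2
  apply PySem.Dict.ext
  rw [PySem.Dict.insert, if_pos hc]
  exact map_replace_eq_self d.items k v hnd (hp0 ▸ hf)

theorem insert_comm (d : PySem.Dict String (List String)) (k k' : String) (v v' : List String)
    (hk : d.contains k = true) (hk' : d.contains k' = true) (hne : k ≠ k') :
    (d.insert k v).insert k' v' = (d.insert k' v').insert k v := by
  have h1 : (d.insert k v).contains k' = true := by
    rw [PySem.Dict.contains_insert, hk']; simp
  have h2 : (d.insert k' v').contains k = true := by
    rw [PySem.Dict.contains_insert, hk]; simp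
  apply PySem.Dict.ext
  rw [PySem.Dict.insert, if_pos h1]
  conv_rhs => rw [PySem.Dict.insert, if_pos h2]
  rw [PySem.Dict.insert, if_pos hk]
  conv_rhs => rw [PySem.Dict.insert, if_pos hk']
  rw [List.map_map, List.map_map]
  apply List.map_congr_left
  intro p _
  simp only [Function.comp]
  by_cases e1 : p.1 = k
  · have b1 : (p.1 == k) = true := beq_iff_eq.mpr e1
    have b2 : (p.1 == k') = false := beq_eq_false_iff_ne.mpr (e1 ▸ hne)
    have b3 : (k == k') = false := beq_eq_false_iff_ne.mpr hne
    simp [b1, b2, b3]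
  · by_cases e2 : p.1 = k'
    · have b1 : (p.1 == k') = true := beq_iff_eq.mpr e2
      have b2 : (p.1 == k) = false := beq_eq_false_iff_ne.mpr e1
      have b3 : (k' == k) = false := beq_eq_false_iff_ne.mpr (Ne.symm hne)
      simp [b1, b2, b3]
    · simp [beq_eq_false_iff_ne.mpr e1, beq_eq_false_iff_ne.mpr e2]

-- A's inner loop over the dict equals one insert of the value-level loop result
theorem dict_loop (F : List String) (k : String) :
    ∀ (l : List String) (d : PySem.Dict String (List String)),
      d.keys.Nodup → d.contains k = true →
      l.foldl (fun r x => if PySem.List.count F x > 0 then r.modify k [] (fun c => (PySem.List.remove? c x).getD c) else r) d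
        = d.insert k (l.foldl (fun cur x => if PySem.List.count F x > 0 then (PySem.List.remove? cur x).getD cur else cur) (d.getD k [])) := by
  intro l
  induction l with
  | nil => intro d hnd hc; exact (insert_getD_self d k [] hnd hc).symm
  | cons x t ih =>
    intro d hnd hc
    simp only [List.foldl_cons]
    by_cases h : PySem.List.count F x > 0
    · rw [if_pos h, if_pos h]
      have hmod : d.modify k [] (fun c => (PySem.List.remove? c x).getD c)
          = d.insert k ((PySem.List.remove? (d.getD k []) x).getD (d.getD k [])) := rfl
      have hnd' : (d.modify k [] (fun c => (PySem.List.remove? c x).getD c)).keys.Nodup := by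
        rw [PySem.Dict.keys_modify, PySem.Dict.keys_insert_of_contains _ _ hc]; exact hnd
      have hc' : (d.modify k [] (fun c => (PySem.List.remove? c x).getD c)).contains k = true := by
        rw [PySem.Dict.contains_modify]; simp [hc]
      rw [ih _ hnd' hc']
      rw [PySem.Dict.getD_modify_self]
      rw [hmod, PySem.Dict.insert_insert_self]
    · rw [if_neg h, if_neg h, ih _ hnd hc]

def pvVal (kwargs : List (String × List String)) (p : String) : List String :=
  (PySem.Dict.mk kwargs).getD p []

def pvFlat (kwargs : List (String × List String)) (ps : List String) : List String :=
  (ps.map (pvVal kwargs)).flatten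

def pvChainA (kwargs : List (String × List String)) (s : PySem.Set String) :
    List String → PySem.Dict String (List String) → PySem.Dict String (List String)
  | [], res => res
  | p :: ps, res =>
    pvChainA kwargs s ps (res.insert p ((pvVal kwargs p).filter
      (fun g => !(PySem.Set.contains s g || (pvFlat kwargs ps).contains g))))

def pvChainB (kwargs : List (String × List String)) :
    List String → PySem.Dict String (List String) → PySem.Set String → PySem.Dict String (List String)
  | [], res, _ => res
  | p :: ps, res, s =>
    pvChainB kwargs ps
      (res.insert p ((pvVal kwargs p).filter (fun g => !(PySem.Set.contains s g))))
      (PySem.Set.update s (pvVal kwargs p))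

theorem chainA_insert (kw : List (String × List String)) (s : PySem.Set String) :
    ∀ (ps : List String) (res : PySem.Dict String (List String)) (k : String) (v : List String),
      k ∉ ps → res.contains k = true → (∀ p ∈ ps, res.contains p = true) →
      pvChainA kw s ps (res.insert k v) = (pvChainA kw s ps res).insert k v := by
  intro ps
  induction ps with
  | nil => intro res k v _ _ _; rfl
  | cons p t ih =>
    intro res k v hk hck hcall
    rw [pvChainA, pvChainA]
    have hpk : p ≠ k := fun e => hk (by simp [e.symm])
    rw [insert_comm res k p _ _ hck (hcall p (List.mem_cons_self ..)) (Ne.symm hpk)]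
    exact ih _ k v (fun h => hk (List.mem_cons_of_mem _ h))
      (by rw [PySem.Dict.contains_insert, hck]; simp)
      (fun q hq => by rw [PySem.Dict.contains_insert, hcall q (List.mem_cons_of_mem _ hq)]; simp)

theorem chainB_append (kw : List (String × List String)) :
    ∀ (xs ys : List String) (res : PySem.Dict String (List String)) (s : PySem.Set String),
      pvChainB kw (xs ++ ys) res s
        = pvChainB kw ys (pvChainB kw xs res s) (xs.foldl (fun s p => PySem.Set.update s (pvVal kw p)) s) := by
  intro xs
  induction xs with
  | nil => intro ys res s; rfl
  | cons x t ih => intro ys res s; rw [List.cons_append, pvChainB, pvChainB, ih, List.foldl_cons]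

theorem seen_contains (kw : List (String × List String)) :
    ∀ (xs : List String) (s : PySem.Set String) (g : String),
      PySem.Set.contains (xs.foldl (fun s p => PySem.Set.update s (pvVal kw p)) s) g
        = (PySem.Set.contains s g || (pvFlat kw xs).contains g) := by
  intro xs
  induction xs with
  | nil => intro s g; simp [pvFlat]
  | cons x t ih =>
    intro s g
    rw [List.foldl_cons, ih]
    have hupd : PySem.Set.contains (PySem.Set.update s (pvVal kw x)) g
        = (PySem.Set.contains s g || (pvVal kw x).contains g) := by simp [pysem]
    rw [hupd]
    simp [pvFlat, Bool.or_assoc]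

theorem flat_reverse_contains (kw : List (String × List String)) (t : List String) (g : String) :
    (pvFlat kw t.reverse).contains g = (pvFlat kw t).contains g := by
  rw [Bool.eq_iff_iff]
  simp [pvFlat, List.mem_flatten]

theorem chainAB (kw : List (String × List String)) :
    ∀ (ps : List String) (res : PySem.Dict String (List String)) (s : PySem.Set String),
      ps.Nodup → (∀ p ∈ ps, res.contains p = true) →
      pvChainA kw s ps res = pvChainB kw ps.reverse res s := by
  intro ps
  induction ps with
  | nil => intro res s _ _; rfl
  | cons p t ih =>
    intro res s hnd hc
    rw [List.reverse_cons, chainB_append, pvChainB, pvChainB]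
    have hw : (pvVal kw p).filter
        (fun g => !(PySem.Set.contains (t.reverse.foldl (fun s p => PySem.Set.update s (pvVal kw p)) s) g))
        = (pvVal kw p).filter (fun g => !(PySem.Set.contains s g || (pvFlat kw t).contains g)) := by
      apply List.filter_congr
      intro g _
      rw [seen_contains, flat_reverse_contains]
    rw [hw, ← ih res s (List.nodup_cons.mp hnd).2 (fun q hq => hc q (List.mem_cons_of_mem _ hq))]
    rw [pvChainA]
    exact chainA_insert kw s t res p _ (List.nodup_cons.mp hnd).1
      (hc p (List.mem_cons_self ..))
      (fun q hq => hc q (List.mem_cons_of_mem _ hq))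

def pvPres (kw : List (String × List String)) : List String :=
  (["RV", "V", "M", "D", "CR"] : List String).filter (fun perm => (PySem.Dict.mk kw).contains perm)

theorem idxOf?_append_cons (p : String) (r : List String) :
    ∀ (done : List String), p ∉ done → List.idxOf? p (done ++ p :: r) = some done.length := by
  intro done
  induction done with
  | nil => intro _; simp [List.idxOf?_cons]
  | cons d t ih =>
    intro h
    rw [List.mem_cons, not_or] at h
    rw [List.cons_append, List.idxOf?_cons, if_neg (by simp [beq_eq_false_iff_ne.mpr (fun e => h.1 e.symm)]), ih h.2]
    rfl

theorem pres_nodup (kw : List (String × List String)) : (pvPres kw).Nodup :=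
  List.Nodup.filter _ (by decide)

theorem mem_pres_contains (kw : List (String × List String)) (p : String) (hp : p ∈ pvPres kw) :
    (PySem.Dict.mk kw).contains p = true := (List.mem_filter.mp hp).2

theorem foldA_gen (kw : List (String × List String)) (hkw : (kw.map Prod.fst).Nodup) :
    ∀ (rest done : List String) (res : PySem.Dict String (List String)),
      pvPres kw = done ++ rest →
      res.keys = kw.map Prod.fst →
      (∀ p ∈ rest, res.getD p [] = pvVal kw p) →
      rest.foldl
        (fun res perm =>
          let higher_permissions : List String :=
            if perm ≠ "CR" then
              PySem.List.slice (pvPres kw) (some ((((PySem.List.index? (pvPres kw) perm).getD 0 : Nat) : Int) + 1)) none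
            else []
          ((PySem.Dict.mk kw).getD perm []).foldl (fun res group =>
            let nested_list := higher_permissions.map (fun hp => (PySem.Dict.mk kw).getD hp [])
            let flat_list := nested_list.flatten
            if PySem.List.count flat_list group > 0 then
              PySem.Dict.modify res perm [] (fun l => (PySem.List.remove? l group).getD l)
            else res) res) res
      = pvChainA kw PySem.Set.empty rest res := by
  intro rest
  induction rest with
  | nil => intro done res _ _ _; rfl
  | cons perm rest' ih =>
    intro done res hpres hkeys hval
    have hnd : (pvPres kw).Nodup := pres_nodup kw
    have hpermmem : perm ∈ pvPres kw := by rw [hpres]; simp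
    have hpnotdone : perm ∉ done := by
      rw [hpres] at hnd
      intro hmem
      exact (List.disjoint_of_nodup_append hnd) hmem (by simp)
    -- higher_permissions = rest'
    have hhigher :
        (if perm ≠ "CR" then
          PySem.List.slice (pvPres kw) (some ((((PySem.List.index? (pvPres kw) perm).getD 0 : Nat) : Int) + 1)) none
        else []) = rest' := by
      by_cases hcr : perm = "CR"
      · have hsub : List.Sublist ("CR" :: rest') ["RV", "V", "M", "D", "CR"] := by
          have h1 : List.Sublist (perm :: rest') (pvPres kw) := by
            rw [hpres]; exact List.sublist_append_right done _
          have h2 := h1.trans (List.filter_sublist)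
          rwa [hcr] at h2
        rw [if_neg (by simp [hcr]), cr_last rest' hsub]
      · rw [if_pos hcr]
        rw [PySem.List.index?, hpres, idxOf?_append_cons perm rest' done hpnotdone]
        have hcast : ((((some done.length).getD 0 : Nat) : Int) + 1) = (((done.length + 1 : Nat)) : Int) := by
          simp
        rw [hcast, PySem.List.slice_from_natCast, ← List.drop_drop, List.drop_left]
        rfl
    have hcres : res.contains perm = true := by
      rw [PySem.Dict.contains_iff_mem_keys, hkeys]
      have := mem_pres_contains kw perm hpermmem
      rw [PySem.Dict.contains_iff_mem_keys] at this
      exact this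
    have hndres : res.keys.Nodup := by rw [hkeys]; exact hkw
    rw [List.foldl_cons]
    simp only [hhigher]
    rw [dict_loop _ perm _ res hndres hcres]
    rw [hval perm (by simp)]
    rw [show (PySem.Dict.mk kw).getD perm ([] : List String) = pvVal kw perm from rfl]
    have hflat : (rest'.map (fun hp => (PySem.Dict.mk kw).getD hp [])).flatten = pvFlat kw rest' := rfl
    rw [hflat, val_loop (pvFlat kw rest') (pvVal kw perm)]
    have hfc : (pvVal kw perm).filter (fun g => !((pvFlat kw rest').contains g))
        = (pvVal kw perm).filter
            (fun g => !(PySem.Set.contains PySem.Set.empty g || (pvFlat kw rest').contains g)) := by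
      apply List.filter_congr
      intro g _
      simp [PySem.Set.contains, PySem.Set.empty]
    rw [hfc]
    rw [pvChainA]
    apply ih (done ++ [perm])
    · rw [hpres, List.append_assoc]; rfl
    · rw [PySem.Dict.keys_insert_of_contains _ _ hcres, hkeys]
    · intro p hp
      have hne : p ≠ perm := by
        intro e
        rw [hpres] at hnd
        have := (List.nodup_append.mp hnd).2.1
        rw [List.nodup_cons] at this
        exact this.1 (e ▸ hp)
      rw [PySem.Dict.getD_insert_of_ne _ _ _ hne, hval p (by simp [hp])]

theorem foldB_gen (kw : List (String × List String)) :
    ∀ (ls : List String) (res : PySem.Dict String (List String)) (s : PySem.Set String),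
      (ls.foldl
        (fun (st : PySem.Dict String (List String) × PySem.Set String) perm =>
          let v := (PySem.Dict.mk kw).getD perm []
          (st.1.insert perm (v.filter (fun g => !(PySem.Set.contains st.2 g))),
           PySem.Set.update st.2 v))
        (res, s)).1 = pvChainB kw ls res s := by
  intro ls
  induction ls with
  | nil => intro res s; rfl
  | cons p t ih => intro res s; rw [List.foldl_cons, pvChainB]; exact ih _ _

theorem portA_chain (kw : List (String × List String)) (hkw : (kw.map Prod.fst).Nodup) :
    remove_duplicates_from_kwargs_py kw
      = (pvChainA kw PySem.Set.empty (pvPres kw) (PySem.Dict.mk kw)).items := by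
  exact congrArg PySem.Dict.items (foldA_gen kw hkw (pvPres kw) [] (PySem.Dict.mk kw) rfl rfl (fun p _ => rfl))

theorem portB_chain (kw : List (String × List String)) :
    remove_duplicates_from_kwargs_py_alt kw
      = (pvChainB kw (pvPres kw).reverse (PySem.Dict.mk kw) PySem.Set.empty).items := by
  have h1 : (["CR", "D", "M", "V", "RV"] : List String)
      = (["RV", "V", "M", "D", "CR"] : List String).reverse := by decide
  have h2 : remove_duplicates_from_kwargs_py_alt kw
      = (((pvPres kw).reverse.foldl
          (fun (st : PySem.Dict String (List String) × PySem.Set String) perm =>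
            let v := (PySem.Dict.mk kw).getD perm []
            (st.1.insert perm (v.filter (fun g => !(PySem.Set.contains st.2 g))),
             PySem.Set.update st.2 v))
          (PySem.Dict.mk kw, PySem.Set.empty)).1).items := by
    rw [remove_duplicates_from_kwargs_py_alt]
    rw [show pvPres kw = (["RV","V","M","D","CR"] : List String).filter (fun perm => (PySem.Dict.mk kw).contains perm) from rfl]
    rw [← List.filter_reverse, ← h1, List.foldl_filter]
  rw [h2, foldB_gen]

theorem main_eq (kw : List (String × List String)) (hkw : (kw.map Prod.fst).Nodup) :
    remove_duplicates_from_kwargs_py kw = remove_duplicates_from_kwargs_py_alt kw := by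
  rw [portA_chain kw hkw, portB_chain kw]
  congr 1
  exact chainAB kw (pvPres kw) (PySem.Dict.mk kw) PySem.Set.empty (pres_nodup kw)
    (fun p hp => mem_pres_contains kw p hp)

-- ===== VERDICT (by name: the statement is the Claim_ definition above) =====
theorem remove_duplicates_from_kwargs_py_spec : Claim_equal_remove_duplicates_from_kwargs_py := by
  intro kwargs _ hpre
  exact main_eq kwargs hpre
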